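-- pv_equiv track=rewrite | github.com/gafnium/rr | filtertools.py | _remove_overlapping_dirs
-- ===== SOURCE A (Python) =====
-- def _remove_overlapping_dirs(dirs):
--     dirs = sorted(dirs)
--     i = 0
--     while i < len(dirs)-1:
--         if dirs[i+1].startswith(dirs[i]):
--             del dirs[i+1]
--         else:
--             i += 1
--     return dirs
-- ===== SOURCE B (Python) =====
-- def _remove_overlapping_dirs(dirs):
--     kept = []
--     last = None
--     for d in sorted(dirs):
--         if last is None or not d.startswith(last):
--             kept.append(d)
--             last = d
--     return kept
-- ===== Notes on version B (the rewrite author's own statement) =====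
-- stated objective: faster
-- what changed: Replace the in-place while loop with repeated list deletions by a single forward pass over the sorted list that tracks the last kept prefix and appends non-prefixed entries.
import Mathlib
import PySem

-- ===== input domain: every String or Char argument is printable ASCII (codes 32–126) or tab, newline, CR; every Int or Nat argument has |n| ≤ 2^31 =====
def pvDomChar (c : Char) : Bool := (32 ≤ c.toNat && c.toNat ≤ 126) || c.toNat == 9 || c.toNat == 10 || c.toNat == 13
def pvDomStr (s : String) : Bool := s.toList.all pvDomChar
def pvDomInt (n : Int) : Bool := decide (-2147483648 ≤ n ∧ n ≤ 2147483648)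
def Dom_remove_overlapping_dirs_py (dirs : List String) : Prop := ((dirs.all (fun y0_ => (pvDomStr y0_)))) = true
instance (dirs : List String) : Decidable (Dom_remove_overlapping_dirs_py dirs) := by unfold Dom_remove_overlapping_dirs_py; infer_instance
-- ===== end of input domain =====

-- B replaces A's in-place while-loop with deletions by a single forward pass over the
-- sorted list that tracks the last kept prefix (measured faster; asymptotically better).


-- ===== PORT A =====
-- the while loop: state is (dirs, i); indices i and i+1 are in range whenever read
-- (i < len(dirs)-1), so List.getD with a dummy default is exact there.
def pvALoop (dirs : List String) (i : Nat) : List String :=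
  if h : i < dirs.length - 1 then
    if PySem.Str.startswith (dirs.getD (i+1) "") (dirs.getD i "") then
      pvALoop (dirs.eraseIdx (i+1)) i        -- del dirs[i+1]
    else
      pvALoop dirs (i+1)                     -- i += 1
  else dirs
termination_by dirs.length - i
decreasing_by
  · have : i + 1 < dirs.length := by omega
    simp only [List.length_eraseIdx, if_pos this]; omega
  · omega

def remove_overlapping_dirs_py (dirs : List String) : List String :=
  pvALoop (PySem.List.sorted dirs (fun x => x) false) 0

-- ===== PORT B =====
-- fold state: (kept, last); last = none only before anything was kept
def pvBStep (st : List String × Option String) (d : String) : List String × Option String :=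
  match st.2 with
  | none => (st.1 ++ [d], some d)
  | some last => if PySem.Str.startswith d last then st else (st.1 ++ [d], some d)

def remove_overlapping_dirs_py_alt (dirs : List String) : List String :=
  ((PySem.List.sorted dirs (fun x => x) false).foldl pvBStep ([], none)).1

-- ===== PRECONDITION & SPEC =====
def Spec_remove_overlapping_dirs_py (dirs : List String) (out : List String) : Prop := out = remove_overlapping_dirs_py_alt dirs
instance (dirs : List String) (out : List String) : Decidable (Spec_remove_overlapping_dirs_py dirs out) := by unfold Spec_remove_overlapping_dirs_py; infer_instance

-- ===== CLAIM (what is proved, stated in full; the proofs are below) =====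
def Claim_equal_remove_overlapping_dirs_py : Prop := ∀ (dirs : List String), Dom_remove_overlapping_dirs_py dirs → Spec_remove_overlapping_dirs_py dirs (remove_overlapping_dirs_py dirs)

-- ===== LEMMAS AND PROOFS =====

-- common characterisation: keep d iff it does not start with the last kept string
def pvG (last : String) : List String → List String
  | [] => []
  | d :: rest => if PySem.Str.startswith d last then pvG last rest else d :: pvG d rest

lemma pvALoop_eq (n : Nat) : ∀ (l : List String) (i : Nat), l.length - i ≤ n → i < l.length →
    pvALoop l i = l.take (i+1) ++ pvG (l.getD i "") (l.drop (i+1)) := by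
  induction n with
  | zero => intro l i hn hi; omega
  | succ n ih =>
    intro l i hn hi
    rw [pvALoop]
    by_cases h1 : i < l.length - 1
    · have hi1 : i + 1 < l.length := by omega
      rw [dif_pos h1]
      have hdrop : l.drop (i+1) = l[i+1] :: l.drop (i+2) := List.drop_eq_getElem_cons hi1
      by_cases hs : PySem.Str.startswith (l.getD (i+1) "") (l.getD i "") = true
      · rw [if_pos hs]
        have hlen : (l.eraseIdx (i+1)).length = l.length - 1 := by
          simp [List.length_eraseIdx, hi1]
        rw [ih (l.eraseIdx (i+1)) i (by omega) (by omega)]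
        rw [List.eraseIdx_eq_take_drop_succ]
        have htl : (l.take (i+1)).length = i + 1 := by simp; omega
        have ht : (l.take (i+1) ++ l.drop (i+1+1)).take (i+1) = l.take (i+1) :=
          List.take_left' htl
        have hd : (l.take (i+1) ++ l.drop (i+1+1)).drop (i+1) = l.drop (i+1+1) :=
          List.drop_left' htl
        have hg : (l.take (i+1) ++ l.drop (i+1+1)).getD i "" = l.getD i "" := by
          rw [List.getD_append _ _ _ _ (by omega)]
          simp [List.getD_eq_getElem?_getD, List.getElem?_take_of_lt (by omega : i < i+1)]
        rw [ht, hg, hd]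
        have hsg : PySem.Str.startswith l[i+1] (l.getD i "") = true := by
          rwa [List.getD_eq_getElem l "" hi1] at hs
        conv_rhs => rw [hdrop, pvG, if_pos hsg]
      · rw [if_neg hs]
        rw [ih l (i+1) (by omega) hi1]
        have hsg : PySem.Str.startswith l[i+1] (l.getD i "") ≠ true := by
          rwa [List.getD_eq_getElem l "" hi1] at hs
        have htake : l.take (i+1+1) = l.take (i+1) ++ [l[i+1]] := by
          rw [List.take_add_one]
          simp [List.getElem?_eq_getElem hi1]
        conv_rhs => rw [hdrop, pvG, if_neg hsg]
        rw [List.getD_eq_getElem l "" hi1, htake, List.append_assoc, List.singleton_append,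
          show i+1+1 = i+2 from rfl]
    · rw [dif_neg h1]
      rw [List.take_of_length_le (by omega), List.drop_eq_nil_of_le (by omega)]
      simp [pvG]

lemma pvBFold_eq : ∀ (rest kept : List String) (last : String),
    (rest.foldl pvBStep (kept, some last)).1 = kept ++ pvG last rest := by
  intro rest
  induction rest with
  | nil => intro kept last; simp [pvG]
  | cons d rest ih =>
    intro kept last
    have hstep : pvBStep (kept, some last) d =
        if PySem.Str.startswith d last then (kept, some last) else (kept ++ [d], some d) := rfl
    rw [List.foldl_cons, hstep, pvG]
    by_cases hs : PySem.Str.startswith d last = true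
    · rw [if_pos hs, if_pos hs, ih]
    · rw [if_neg hs, if_neg hs, ih]
      simp

-- ===== VERDICT (by name: the statement is the Claim_ definition above) =====
theorem remove_overlapping_dirs_py_spec : Claim_equal_remove_overlapping_dirs_py := by
  intro dirs _
  unfold Spec_remove_overlapping_dirs_py remove_overlapping_dirs_py remove_overlapping_dirs_py_alt
  cases hs : PySem.List.sorted dirs (fun x => x) false with
  | nil => rw [pvALoop]; simp
  | cons h t =>
    rw [pvALoop_eq (h :: t).length (h :: t) 0 (by omega) (by simp)]
    rw [List.foldl_cons]
    have hstep : pvBStep ([], none) h = ([h], some h) := rfl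
    rw [hstep, pvBFold_eq t [h] h]
    simp
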